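-- pv_equiv track=rewrite | github.com/Darshanh20/OceanLab_Hacks_SALC | backendv2/app/services/processing/normalization_service.py | _apply_speaker_detection
-- ===== SOURCE A (Python) =====
-- from typing import Dict, Any, Optional, List
--
-- def _apply_speaker_detection(segments: List[Dict[str, Any]]) -> List[Dict[str, Any]]:
--     """
--     Apply fallback speaker assignment if needed.
--
--     If speaker field is missing or empty, assigns Speaker 1, Speaker 2, etc.
--     """
--     result = []
--     speaker_map = {}
--     next_speaker_id = 1
--
--     for segment in segments:
--         speaker = segment.get("speaker", "").strip()
--
--         if not speaker or speaker == "Unknown":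
--             # Check if we've seen this speaker pattern before
--             if "Unknown" not in speaker_map:
--                 speaker_map["Unknown"] = f"Speaker {next_speaker_id}"
--                 next_speaker_id += 1
--             speaker = speaker_map["Unknown"]
--         else:
--             # Map consistent speaker names
--             if speaker not in speaker_map:
--                 speaker_map[speaker] = f"Speaker {next_speaker_id}"
--                 next_speaker_id += 1
--             speaker = speaker_map[speaker]
--
--         segment["speaker"] = speaker
--         result.append(segment)
--
--     return result
-- ===== SOURCE B (Python) =====
-- def _apply_speaker_detection(segments):
--     """Rank-based relabelling: record each normalized speaker key's
--     first-occurrence index, then label every segment by the order-rank of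
--     its key's first occurrence (1 + number of keys first seen earlier).
--     No running counter and no label map. Mutates the segment dicts in
--     place, like the original."""
--     def key_of(segment):
--         s = segment.get("speaker", "").strip()
--         return "Unknown" if not s or s == "Unknown" else s
--
--     first = {}
--     for i, segment in enumerate(segments):
--         k = key_of(segment)
--         if k not in first:
--             first[k] = i
--
--     for segment in segments:
--         f = first[key_of(segment)]
--         rank = sum(1 for g in first.values() if g < f)
--         segment["speaker"] = f"Speaker {rank + 1}"
--     return segments
-- ===== Notes on version B (the rewrite author's own statement) =====
-- stated objective: alternative
-- what changed: A threads a running counter and a name-to-label map, assigning the next label string the moment a new speaker appears; B never keeps a counter or a label map: it records each normalized key's first-occurrence index and then derives every segment's label arithmetically as the order-rank of that index (1 + count of keys first seen earlier).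
import Mathlib
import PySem

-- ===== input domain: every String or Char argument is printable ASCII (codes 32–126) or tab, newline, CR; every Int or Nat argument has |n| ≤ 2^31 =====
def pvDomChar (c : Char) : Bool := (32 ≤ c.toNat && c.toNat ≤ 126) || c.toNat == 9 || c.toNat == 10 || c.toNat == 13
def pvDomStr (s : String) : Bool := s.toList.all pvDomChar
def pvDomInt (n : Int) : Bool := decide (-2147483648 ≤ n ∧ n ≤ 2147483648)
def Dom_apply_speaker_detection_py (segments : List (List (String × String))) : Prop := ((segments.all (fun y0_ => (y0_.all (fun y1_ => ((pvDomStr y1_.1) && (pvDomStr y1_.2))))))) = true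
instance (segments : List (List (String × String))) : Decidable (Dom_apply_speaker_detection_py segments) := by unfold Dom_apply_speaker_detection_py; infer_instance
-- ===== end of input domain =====

-- B replaces A's running counter + name-to-label map by rank computation: it records
-- each normalized key's first-occurrence index and labels every segment by the
-- order-rank of that index (objective: alternative, similar cost).
-- A mutates the segment dicts in place (B performs the same mutation); the
-- equivalence proved here is about the returned value.


-- ===== PORT A =====
-- assoc-list primitives for a segment dict (shared by both ports):
-- segGet = segment.get("speaker", "")  (first match, per the type convention)
def segGet (seg : List (String × String)) : String :=
  match seg with
  | [] => ""
  | (k, v) :: rest => if k = "speaker" then v else segGet rest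

-- segSet = segment["speaker"] = v  (overwrite in place keeps position; a new key appends)
def segSet (seg : List (String × String)) (v : String) : List (String × String) :=
  match seg with
  | [] => [("speaker", v)]
  | (k, w) :: rest => if k = "speaker" then ("speaker", v) :: rest else (k, w) :: segSet rest v

-- the for-loop of A, state (result, speaker_map, next_speaker_id)
def aLoop (segs : List (List (String × String))) (result : List (List (String × String)))
    (smap : PySem.Dict String String) (nid : Int) : List (List (String × String)) :=
  match segs with
  | [] => result
  | seg :: rest =>
    let speaker := PySem.Str.strip (segGet seg)
    if speaker = "" ∨ speaker = "Unknown" then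
      let smap' := if smap.contains "Unknown" then smap
                   else smap.insert "Unknown" ("Speaker " ++ PySem.Int.toStr nid)
      let nid' := if smap.contains "Unknown" then nid else nid + 1
      aLoop rest (result ++ [segSet seg (smap'.getD "Unknown" "")]) smap' nid'
    else
      let smap' := if smap.contains speaker then smap
                   else smap.insert speaker ("Speaker " ++ PySem.Int.toStr nid)
      let nid' := if smap.contains speaker then nid else nid + 1
      aLoop rest (result ++ [segSet seg (smap'.getD speaker "")]) smap' nid'

def apply_speaker_detection_py (segments : List (List (String × String))) : List (List (String × String)) :=
  aLoop segments [] PySem.Dict.empty 1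

-- ===== PORT B =====
-- key_of(segment) from Source B
def keyOf (seg : List (String × String)) : String :=
  let s := PySem.Str.strip (segGet seg)
  if s = "" ∨ s = "Unknown" then "Unknown" else s

-- first pass of Source B: `for i, segment in enumerate(segments): if k not in first: first[k] = i`
def firstLoop (segs : List (List (String × String))) (i : Int)
    (first : PySem.Dict String Int) : PySem.Dict String Int :=
  match segs with
  | [] => first
  | seg :: rest =>
    firstLoop rest (i + 1)
      (if first.contains (keyOf seg) then first else first.insert (keyOf seg) i)

-- second pass of Source B: first[key_of(segment)] never misses (every key was inserted
-- in the first pass), so the lookup is ported as getD with an unused default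
def apply_speaker_detection_py_alt (segments : List (List (String × String))) : List (List (String × String)) :=
  let first := firstLoop segments 0 PySem.Dict.empty
  segments.map (fun seg =>
    let f := first.getD (keyOf seg) 0
    let rank := (first.values.filter (fun g => g < f)).length
    segSet seg ("Speaker " ++ PySem.Int.toStr ((rank : Int) + 1)))

-- ===== PRECONDITION & SPEC =====
def Spec_apply_speaker_detection_py (segments : List (List (String × String))) (out : List (List (String × String))) : Prop := out = apply_speaker_detection_py_alt segments
instance (segments : List (List (String × String))) (out : List (List (String × String))) : Decidable (Spec_apply_speaker_detection_py segments out) := by unfold Spec_apply_speaker_detection_py; infer_instance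

-- ===== CLAIM (what is proved, stated in full; the proofs are below) =====
def Claim_equal_apply_speaker_detection_py : Prop := ∀ (segments : List (List (String × String))), Dom_apply_speaker_detection_py segments → Spec_apply_speaker_detection_py segments (apply_speaker_detection_py segments)

-- ===== LEMMAS AND PROOFS =====

-- ---- characterisation of A: its loop labels by first-seen position ----

-- the distinct keys in first-seen order (proof-side notion shared by both characterisations)
def bKeys (segs : List (List (String × String))) (keys : List String) : List String :=
  match segs with
  | [] => keys
  | seg :: rest => bKeys rest (if keyOf seg ∈ keys then keys else keys ++ [keyOf seg])

-- the label for the (0-based) position i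
def lbl (i : Nat) : String := "Speaker " ++ PySem.Int.toStr ((i : Int) + 1)

-- the items list of A's speaker_map after the keys `ks` were inserted, numbering from i
def labelItems (ks : List String) (i : Nat) : List (String × String) :=
  match ks with
  | [] => []
  | k :: rest => (k, lbl i) :: labelItems rest (i + 1)

theorem labelItems_append (ks : List String) (k : String) :
    ∀ i, labelItems (ks ++ [k]) i = labelItems ks i ++ [(k, lbl (i + ks.length))] := by
  induction ks with
  | nil => intro i; simp [labelItems]
  | cons a rest ih =>
    intro i
    simp only [List.cons_append, labelItems, ih (i + 1), List.length_cons]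
    have : i + 1 + rest.length = i + (rest.length + 1) := by omega
    rw [this]

theorem contains_labelItems (ks : List String) (x : String) :
    ∀ i, (PySem.Dict.mk (labelItems ks i)).contains x = decide (x ∈ ks) := by
  induction ks with
  | nil => intro i; simp [labelItems, PySem.Dict.contains_mk]
  | cons a rest ih =>
    intro i
    have := ih (i + 1)
    simp [labelItems, PySem.Dict.contains_mk] at this ⊢
    by_cases h : a = x
    · simp [h, this]
    · simp only [this]
      rw [show (a == x) = false from beq_eq_false_iff_ne.mpr h,
        show decide (x = a) = false from decide_eq_false (fun hh => h hh.symm)]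

theorem get?_labelItems (ks : List String) (x : String) (hx : x ∈ ks) :
    ∀ i, (PySem.Dict.mk (labelItems ks i)).get? x = some (lbl (i + ks.idxOf x)) := by
  induction ks with
  | nil => cases hx
  | cons a rest ih =>
    intro i
    rw [labelItems, PySem.Dict.get?_mk_cons]
    by_cases h : a = x
    · simp [h, List.idxOf_cons_self]
    · have hx' : x ∈ rest := by cases hx with | head => exact absurd rfl h | tail _ h' => exact h'
      rw [if_neg (by simpa using h), ih hx' (i + 1), List.idxOf_cons_ne _ h]
      exact congrArg (fun n => some (lbl n)) (by omega)

theorem getD_labelItems (ks : List String) (x : String) (hx : x ∈ ks) (i : Nat) :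
    (PySem.Dict.mk (labelItems ks i)).getD x "" = lbl (i + ks.idxOf x) := by
  rw [PySem.Dict.getD_eq_get?_getD, get?_labelItems ks x hx i]; rfl

-- inserting a fresh key appends the next label
theorem insert_labelItems (ks : List String) (k : String) (hk : k ∉ ks) :
    (PySem.Dict.mk (labelItems ks 0)).insert k (lbl ks.length)
      = PySem.Dict.mk (labelItems (ks ++ [k]) 0) := by
  apply PySem.Dict.ext
  rw [PySem.Dict.items_insert_of_not_contains]
  · rw [labelItems_append]; simp
  · rw [contains_labelItems]; simpa using hk

-- bKeys only ever appends to its accumulator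
theorem bKeys_extends (segs : List (List (String × String))) :
    ∀ ks, ∃ t, bKeys segs ks = ks ++ t := by
  induction segs with
  | nil => intro ks; exact ⟨[], by simp [bKeys]⟩
  | cons seg rest ih =>
    intro ks
    rw [bKeys]
    by_cases h : keyOf seg ∈ ks
    · simpa [h] using ih ks
    · obtain ⟨t, ht⟩ := ih (ks ++ [keyOf seg])
      exact ⟨keyOf seg :: t, by simp [h, ht]⟩

theorem idxOf_bKeys (segs : List (List (String × String))) (ks : List String)
    (x : String) (hx : x ∈ ks) : (bKeys segs ks).idxOf x = ks.idxOf x := by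
  obtain ⟨t, ht⟩ := bKeys_extends segs ks
  rw [ht, List.idxOf_append_of_mem hx]

-- A's loop step, expressed through keyOf: both branches do the same thing with key = keyOf seg
theorem aLoop_step (seg : List (String × String)) (rest : List (List (String × String)))
    (result : List (List (String × String))) (smap : PySem.Dict String String) (nid : Int) :
    aLoop (seg :: rest) result smap nid =
      (if smap.contains (keyOf seg) then
        aLoop rest (result ++ [segSet seg (smap.getD (keyOf seg) "")]) smap nid
      else
        aLoop rest
          (result ++ [segSet seg
            ((smap.insert (keyOf seg) ("Speaker " ++ PySem.Int.toStr nid)).getD (keyOf seg) "")])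
          (smap.insert (keyOf seg) ("Speaker " ++ PySem.Int.toStr nid)) (nid + 1)) := by
  rw [aLoop]
  by_cases h : PySem.Str.strip (segGet seg) = "" ∨ PySem.Str.strip (segGet seg) = "Unknown"
  · have hk : keyOf seg = "Unknown" := by simp [keyOf, h]
    rw [hk]
    simp only [if_pos h]
    by_cases hc : smap.contains "Unknown" <;> simp [hc]
  · have hk : keyOf seg = PySem.Str.strip (segGet seg) := by simp [keyOf, h]
    rw [hk]
    simp only [if_neg h]
    by_cases hc : smap.contains (PySem.Str.strip (segGet seg)) <;> simp [hc]

-- main invariant of A: its loop from the state reached after first-seen keys `ks`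
-- labels each segment by the position of its key in the first-seen list
theorem aLoop_eq (segs : List (List (String × String))) :
    ∀ (ks : List String) (result : List (List (String × String))),
      aLoop segs result (PySem.Dict.mk (labelItems ks 0)) ((ks.length : Int) + 1)
        = result ++ segs.map (fun seg =>
            segSet seg ("Speaker " ++ PySem.Int.toStr (((bKeys segs ks).idxOf (keyOf seg) : Int) + 1))) := by
  induction segs with
  | nil => intro ks result; simp [aLoop]
  | cons seg rest ih =>
    intro ks result
    rw [aLoop_step]
    by_cases hmem : keyOf seg ∈ ks
    · rw [if_pos (by rw [contains_labelItems]; simpa using hmem)]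
      rw [getD_labelItems ks _ hmem, ih ks]
      have hb : bKeys (seg :: rest) ks = bKeys rest ks := by rw [bKeys, if_pos hmem]
      rw [hb, List.map_cons, idxOf_bKeys rest ks _ hmem]
      simp [lbl]
    · rw [if_neg (by rw [contains_labelItems]; simpa using hmem)]
      have hlbl : ("Speaker " ++ PySem.Int.toStr ((ks.length : Int) + 1)) = lbl ks.length := rfl
      rw [hlbl, insert_labelItems ks _ hmem]
      have hlen : ((ks.length : Int) + 1) + 1 = (((ks ++ [keyOf seg]).length : Nat) : Int) + 1 := by
        rw [List.length_append, List.length_singleton]; push_cast; ring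
      rw [hlen, ih (ks ++ [keyOf seg])]
      have hmem' : keyOf seg ∈ ks ++ [keyOf seg] := by simp
      have hb : bKeys (seg :: rest) ks = bKeys rest (ks ++ [keyOf seg]) := by
        rw [bKeys, if_neg hmem]
      rw [hb, List.map_cons, idxOf_bKeys rest _ _ hmem',
        getD_labelItems _ _ hmem', List.idxOf_append_of_notMem hmem]
      simp [lbl, List.idxOf_cons_self]

-- ---- characterisation of B: the rank count equals the first-seen position ----

-- plain-items mirror of firstLoop
def flItems (segs : List (List (String × String))) (i : Int)
    (l : List (String × Int)) : List (String × Int) :=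
  match segs with
  | [] => l
  | seg :: rest =>
    flItems rest (i + 1)
      (if keyOf seg ∈ l.map Prod.fst then l else l ++ [(keyOf seg, i)])

theorem contains_mk_eq (l : List (String × Int)) (k : String) :
    (PySem.Dict.mk l).contains k = decide (k ∈ l.map Prod.fst) := by
  rw [PySem.Dict.contains_eq_decide_mem_keys]
  simp [PySem.Dict.keys]

theorem insert_mk_append (l : List (String × Int)) (k : String) (v : Int)
    (h : k ∉ l.map Prod.fst) :
    (PySem.Dict.mk l).insert k v = PySem.Dict.mk (l ++ [(k, v)]) := by
  apply PySem.Dict.ext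
  rw [PySem.Dict.items_insert_of_not_contains]
  rw [contains_mk_eq, decide_eq_false_iff_not]
  exact h

theorem firstLoop_eq_mk (segs : List (List (String × String))) :
    ∀ (i : Int) (l : List (String × Int)),
      firstLoop segs i (PySem.Dict.mk l) = PySem.Dict.mk (flItems segs i l) := by
  induction segs with
  | nil => intro i l; rfl
  | cons seg rest ih =>
    intro i l
    rw [firstLoop, flItems]
    by_cases h : keyOf seg ∈ l.map Prod.fst
    · have hc : (PySem.Dict.mk l).contains (keyOf seg) = true := by
        rw [contains_mk_eq]; simpa using h
      rw [if_pos h, if_pos hc, ih]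
    · have hc : ¬ (PySem.Dict.mk l).contains (keyOf seg) = true := by
        rw [contains_mk_eq]; simpa using h
      rw [if_neg h, if_neg hc, insert_mk_append l _ i h, ih]

theorem flItems_keys (segs : List (List (String × String))) :
    ∀ (i : Int) (l : List (String × Int)),
      (flItems segs i l).map Prod.fst = bKeys segs (l.map Prod.fst) := by
  induction segs with
  | nil => intro i l; rfl
  | cons seg rest ih =>
    intro i l
    rw [flItems, bKeys]
    by_cases h : keyOf seg ∈ l.map Prod.fst
    · rw [if_pos h, if_pos h, ih]
    · rw [if_neg h, if_neg h, ih]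
      congr 1
      simp

theorem flItems_sorted (segs : List (List (String × String))) :
    ∀ (i : Int) (l : List (String × Int)),
      (l.map Prod.snd).Pairwise (· < ·) → (∀ v ∈ l.map Prod.snd, v < i) →
      ((flItems segs i l).map Prod.snd).Pairwise (· < ·) := by
  induction segs with
  | nil => intro i l hpw _; exact hpw
  | cons seg rest ih =>
    intro i l hpw hbd
    rw [flItems]
    by_cases h : keyOf seg ∈ l.map Prod.fst
    · rw [if_pos h]
      exact ih (i + 1) l hpw (fun v hv => lt_trans (hbd v hv) (by omega))
    · rw [if_neg h]
      apply ih (i + 1) (l ++ [(keyOf seg, i)])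
      · rw [List.map_append]
        rw [List.pairwise_append]
        exact ⟨hpw, by simp, by intro a ha b hb; simp at hb; subst hb; exact hbd a ha⟩
      · intro v hv
        rw [List.map_append] at hv
        rcases List.mem_append.mp hv with hv | hv
        · exact lt_trans (hbd v hv) (by omega)
        · simp at hv; omega

-- membership of a segment's key in the first-seen list
theorem mem_bKeys (segs : List (List (String × String))) :
    ∀ (ks : List String) (seg : List (String × String)), seg ∈ segs →
      keyOf seg ∈ bKeys segs ks := by
  induction segs with
  | nil => intro ks seg h; cases h
  | cons s rest ih =>
    intro ks seg h
    rw [bKeys]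
    cases h with
    | head =>
      by_cases hm : keyOf s ∈ ks
      · rw [if_pos hm]
        obtain ⟨t, ht⟩ := bKeys_extends rest ks
        rw [ht]; exact List.mem_append_left _ hm
      · rw [if_neg hm]
        obtain ⟨t, ht⟩ := bKeys_extends rest (ks ++ [keyOf s])
        rw [ht]; exact List.mem_append_left _ (by simp)
    | tail _ h' => exact ih _ seg h'

theorem getD_mem_values (l : List (String × Int)) (k : String) (hk : k ∈ l.map Prod.fst) :
    (PySem.Dict.mk l).getD k 0 ∈ l.map Prod.snd := by
  induction l with
  | nil => simp at hk
  | cons p rest ih =>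
    obtain ⟨a, v⟩ := p
    rw [PySem.Dict.getD_eq_get?_getD, PySem.Dict.get?_mk_cons]
    by_cases h : a = k
    · simp [h]
    · rw [if_neg (by simpa using h), ← PySem.Dict.getD_eq_get?_getD]
      have hk' : k ∈ rest.map Prod.fst := by
        simp only [List.map_cons, List.mem_cons] at hk
        rcases hk with h1 | h1
        · exact absurd h1.symm h
        · exact h1
      exact List.mem_cons_of_mem _ (ih hk')

-- the heart of B's correctness: in a value-sorted association list, counting the
-- strictly smaller values of a key's value gives the key's position
theorem count_rank (l : List (String × Int)) (k : String)
    (hpw : (l.map Prod.snd).Pairwise (· < ·)) (hk : k ∈ l.map Prod.fst) :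
    ((l.map Prod.snd).filter (fun g => g < (PySem.Dict.mk l).getD k 0)).length
      = (l.map Prod.fst).idxOf k := by
  induction l with
  | nil => simp at hk
  | cons p rest ih =>
    obtain ⟨a, v⟩ := p
    simp only [List.map_cons] at hpw ⊢
    have hhead : ∀ w ∈ rest.map Prod.snd, v < w := (List.pairwise_cons.mp hpw).1
    have htail : (rest.map Prod.snd).Pairwise (· < ·) := (List.pairwise_cons.mp hpw).2
    by_cases h : a = k
    · have hget : (PySem.Dict.mk ((a, v) :: rest)).getD k 0 = v := by
        rw [PySem.Dict.getD_eq_get?_getD, PySem.Dict.get?_mk_cons,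
          if_pos (by simpa using h)]
        rfl
      rw [hget, h, List.idxOf_cons_self]
      rw [List.length_eq_zero_iff]
      rw [List.filter_eq_nil_iff]
      intro w hw
      rcases List.mem_cons.mp hw with hw | hw
      · subst hw; simp
      · simpa using not_lt.mpr (le_of_lt (hhead w hw))
    · have hget : (PySem.Dict.mk ((a, v) :: rest)).getD k 0 = (PySem.Dict.mk rest).getD k 0 := by
        rw [PySem.Dict.getD_eq_get?_getD, PySem.Dict.get?_mk_cons,
          if_neg (by simpa using h), ← PySem.Dict.getD_eq_get?_getD]
      have hk' : k ∈ rest.map Prod.fst := by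
        simp only [List.map_cons, List.mem_cons] at hk
        rcases hk with h1 | h1
        · exact absurd h1.symm h
        · exact h1
      have hvf : v < (PySem.Dict.mk rest).getD k 0 :=
        hhead _ (getD_mem_values rest k hk')
      rw [hget, List.filter_cons, if_pos (by simpa using hvf), List.length_cons,
        ih htail hk', List.idxOf_cons_ne _ h]

-- ===== VERDICT (by name: the statement is the Claim_ definition above) =====
theorem apply_speaker_detection_py_spec : Claim_equal_apply_speaker_detection_py := by
  intro segments _
  show apply_speaker_detection_py segments = apply_speaker_detection_py_alt segments
  rw [apply_speaker_detection_py, apply_speaker_detection_py_alt]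
  have h0 : (PySem.Dict.empty : PySem.Dict String String) = PySem.Dict.mk (labelItems [] 0) := rfl
  have hA := aLoop_eq segments [] []
  simp only [List.length_nil, Nat.cast_zero, zero_add, ] at hA
  rw [h0, hA]
  rw [show (PySem.Dict.empty : PySem.Dict String Int) = PySem.Dict.mk [] from rfl,
    firstLoop_eq_mk segments 0 []]
  simp only [List.nil_append]
  apply List.map_congr_left
  intro seg hseg
  have hkeys : (flItems segments 0 []).map Prod.fst = bKeys segments [] := by
    simpa using flItems_keys segments 0 []
  have hpw : ((flItems segments 0 []).map Prod.snd).Pairwise (· < ·) :=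
    flItems_sorted segments 0 [] (by simp) (by simp)
  have hmem : keyOf seg ∈ (flItems segments 0 []).map Prod.fst := by
    rw [hkeys]; exact mem_bKeys segments [] seg hseg
  have hval : (PySem.Dict.mk (flItems segments 0 [])).values
      = (flItems segments 0 []).map Prod.snd := by
    simp [PySem.Dict.values]
  rw [hval, count_rank (flItems segments 0 []) (keyOf seg) hpw hmem, hkeys]
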